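-- pv_equiv track=rewrite | github.com/b21727432/HackerRank | bahce visit problem.py | nextDest
-- ===== SOURCE A (Python) =====
-- def nextDest(baglantilar, visited):
--     count = 0
--     for (x,y) in baglantilar:
--         for(z,t) in baglantilar:
--             if(x == t):
--                 if z not in visited:
--                     return z
--     if(count == 0):
--         return 0
-- ===== SOURCE B (Python) =====
-- def nextDest(baglantilar, visited):
--     vis = set(visited)
--     first = {}
--     for z, t in baglantilar:
--         if t not in first and z not in vis:
--             first[t] = z
--     for x, _ in baglantilar:
--         if x in first:
--             return first[x]
--     return 0
-- ===== Notes on version B (the rewrite author's own statement) =====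
-- stated objective: alternative
-- what changed: Replaced the nested scan (worst-case quadratic) by building a dict target->first-unvisited-source in one pass and then a single lookup pass over edge sources; on typical random inputs A exits early, so no speed is claimed.
import Mathlib
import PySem

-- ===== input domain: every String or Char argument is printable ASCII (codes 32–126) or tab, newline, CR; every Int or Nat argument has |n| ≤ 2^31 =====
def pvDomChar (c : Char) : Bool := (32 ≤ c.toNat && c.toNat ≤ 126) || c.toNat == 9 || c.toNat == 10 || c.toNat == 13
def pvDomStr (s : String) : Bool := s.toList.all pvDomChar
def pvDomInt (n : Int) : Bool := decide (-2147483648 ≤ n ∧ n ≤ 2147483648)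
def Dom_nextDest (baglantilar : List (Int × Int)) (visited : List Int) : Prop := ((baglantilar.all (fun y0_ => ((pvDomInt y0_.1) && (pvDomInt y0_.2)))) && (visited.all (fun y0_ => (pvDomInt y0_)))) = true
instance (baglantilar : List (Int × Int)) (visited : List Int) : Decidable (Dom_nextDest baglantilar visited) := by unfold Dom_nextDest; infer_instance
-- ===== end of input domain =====

-- B replaces A's nested scan by a dict target->first-unvisited-source built in one pass, then a single lookup pass (objective: alternative algorithm).


-- ===== PORT A =====
-- inner loop of A: first z in the list with x == t and z not in visited
def nextDestInner (visited : List Int) (x : Int) : List (Int × Int) → Option Int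
  | [] => none
  | (z, t) :: rest =>
    if x == t then
      if visited.contains z then nextDestInner visited x rest else some z
    else nextDestInner visited x rest

-- outer loop of A over the full edge list; 0 when exhausted (A's final `return 0`)
def nextDestOuter (full : List (Int × Int)) (visited : List Int) : List (Int × Int) → Int
  | [] => 0
  | (x, _) :: rest =>
    match nextDestInner visited x full with
    | some z => z
    | none => nextDestOuter full visited rest

def nextDest (baglantilar : List (Int × Int)) (visited : List Int) : Int :=
  nextDestOuter baglantilar visited baglantilar

-- ===== PORT B =====
-- first = {}; for (z,t): if t not in first and z not in vis: first[t] = z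
def buildFirst (vis : PySem.Set Int) : List (Int × Int) → PySem.Dict Int Int → PySem.Dict Int Int
  | [], d => d
  | (z, t) :: rest, d =>
    buildFirst vis rest (if !(d.contains t) && !(PySem.Set.contains vis z) then d.insert t z else d)

-- second pass: first edge source x present in the dict
def scanFirst (d : PySem.Dict Int Int) : List (Int × Int) → Int
  | [] => 0
  | (x, _) :: rest =>
    match d.get? x with
    | some z => z
    | none => scanFirst d rest

def nextDest_alt (baglantilar : List (Int × Int)) (visited : List Int) : Int :=
  scanFirst (buildFirst (PySem.Set.ofList visited) baglantilar PySem.Dict.empty) baglantilar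

-- ===== PRECONDITION & SPEC =====
def Spec_nextDest (baglantilar : List (Int × Int)) (visited : List Int) (out : Int) : Prop := out = nextDest_alt baglantilar visited
instance (baglantilar : List (Int × Int)) (visited : List Int) (out : Int) : Decidable (Spec_nextDest baglantilar visited out) := by unfold Spec_nextDest; infer_instance

-- ===== CLAIM (what is proved, stated in full; the proofs are below) =====
def Claim_equal_nextDest : Prop := ∀ (baglantilar : List (Int × Int)) (visited : List Int), Dom_nextDest baglantilar visited → Spec_nextDest baglantilar visited (nextDest baglantilar visited)

-- ===== LEMMAS AND PROOFS =====

theorem ofList_contains (xs : List Int) (z : Int) :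
    PySem.Set.contains (PySem.Set.ofList xs) z = xs.contains z := by
  by_cases h : z ∈ xs
  · simp [PySem.Set.mem_ofList, h]
  · simp [PySem.Set.mem_ofList, h]

theorem build_get (visited : List Int) (x : Int) :
    ∀ (bag : List (Int × Int)) (d : PySem.Dict Int Int),
      (buildFirst (PySem.Set.ofList visited) bag d).get? x =
        match d.get? x with
        | some v => some v
        | none => nextDestInner visited x bag := by
  intro bag
  induction bag with
  | nil => intro d; cases hd : d.get? x <;> simp [buildFirst, nextDestInner, hd]
  | cons p rest ih =>
    intro d
    obtain ⟨z, t⟩ := p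
    simp only [buildFirst, nextDestInner]
    by_cases hxt : x = t
    · subst hxt
      cases hd : d.get? x with
      | some v =>
        have hc : d.contains x = true := by
          rw [PySem.Dict.contains_eq_isSome_get?, hd]; rfl
        rw [hc]
        simp only [Bool.not_true, Bool.false_and, Bool.false_eq_true, if_false]
        rw [ih d, hd]
      | none =>
        have hc : d.contains x = false := by
          rw [PySem.Dict.contains_eq_isSome_get?, hd]; rfl
        rw [ofList_contains]
        by_cases hz : visited.contains z = true
        · rw [hc, hz]
          simp only [Bool.not_true, Bool.not_false, Bool.true_and, Bool.false_eq_true, if_false]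
          rw [ih d, hd]
          simp
        · rw [hc, Bool.eq_false_iff.mpr hz]
          simp only [Bool.not_false, Bool.true_and, if_true]
          rw [ih (d.insert x z), PySem.Dict.get?_insert_self]
          simp
    · have hne : (x == t) = false := by simp [hxt]
      have hg : (if !(d.contains t) && !(PySem.Set.contains (PySem.Set.ofList visited) z)
           then d.insert t z else d).get? x = d.get? x := by
        split
        · exact PySem.Dict.get?_insert_of_ne d z hxt
        · rfl
      rw [ih, hg, hne]
      simp

theorem scan_eq_outer (full : List (Int × Int)) (visited : List Int) :
    ∀ rem : List (Int × Int),
      scanFirst (buildFirst (PySem.Set.ofList visited) full PySem.Dict.empty) rem =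
        nextDestOuter full visited rem := by
  intro rem
  induction rem with
  | nil => rfl
  | cons p rest ih =>
    obtain ⟨x, y⟩ := p
    simp only [scanFirst, nextDestOuter]
    rw [build_get visited x full PySem.Dict.empty]
    cases h : nextDestInner visited x full <;> simp [PySem.Dict.get?_empty, ih]

-- ===== VERDICT (by name: the statement is the Claim_ definition above) =====
theorem nextDest_spec : Claim_equal_nextDest := by
  intro bag visited _
  unfold Spec_nextDest nextDest nextDest_alt
  rw [scan_eq_outer bag visited bag]
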